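-- pv_equiv track=rewrite | github.com/HarshdeepAthawale/IDS | backend/utils/validators.py | validate_query_params
-- ===== SOURCE A (Python) =====
-- from typing import Dict, Any, Optional, List, Tuple
--
-- def sanitize_string(value: Any, max_length: int = 1000) -> Optional[str]:
--     """Sanitize string input"""
--     if value is None:
--         return None
--     if not isinstance(value, str):
--         value = str(value)
--     # Remove null bytes and limit length
--     value = value.replace('\x00', '').strip()
--     if len(value) > max_length:
--         value = value[:max_length]
--     return value
--
-- def validate_query_params(params: Dict[str, Any], allowed_params: List[str]) -> Dict[str, Any]:
--     """Validate and sanitize query parameters"""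
--     validated = {}
--     for key in allowed_params:
--         if key in params:
--             value = params[key]
--             # Sanitize string values
--             if isinstance(value, str):
--                 validated[key] = sanitize_string(value, max_length=500)
--             else:
--                 validated[key] = value
--     return validated
-- ===== SOURCE B (Python) =====
-- from typing import Dict, Any, Optional, List
--
-- def sanitize_string(value: Any, max_length: int = 1000) -> Optional[str]:
--     """Sanitize string input"""
--     if value is None:
--         return None
--     if not isinstance(value, str):
--         value = str(value)
--     value = value.replace('\x00', '').strip()
--     if len(value) > max_length:
--         value = value[:max_length]
--     return value
--
-- def validate_query_params(params: Dict[str, Any], allowed_params: List[str]) -> Dict[str, Any]: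
--     """Sanitize the data in one pass, then select along the de-duplicated whitelist."""
--     sanitized = {k: (sanitize_string(v, max_length=500) if isinstance(v, str) else v)
--                  for k, v in params.items()}
--     return {k: sanitized[k] for k in dict.fromkeys(allowed_params) if k in sanitized}
-- ===== Notes on version B (the rewrite author's own statement) =====
-- stated objective: idiomatic
-- what changed: B replaces A's single loop over allowed_params (membership test + lookup + type dispatch + dict insert per key) by two comprehensions: one pass that sanitizes all of params up front, then a selection over the de-duplicated whitelist; Pre_ only excludes association lists with duplicate params keys, which represent no Python dict (the encodings would disagree on which value of a duplicated key survives).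
import Mathlib
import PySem

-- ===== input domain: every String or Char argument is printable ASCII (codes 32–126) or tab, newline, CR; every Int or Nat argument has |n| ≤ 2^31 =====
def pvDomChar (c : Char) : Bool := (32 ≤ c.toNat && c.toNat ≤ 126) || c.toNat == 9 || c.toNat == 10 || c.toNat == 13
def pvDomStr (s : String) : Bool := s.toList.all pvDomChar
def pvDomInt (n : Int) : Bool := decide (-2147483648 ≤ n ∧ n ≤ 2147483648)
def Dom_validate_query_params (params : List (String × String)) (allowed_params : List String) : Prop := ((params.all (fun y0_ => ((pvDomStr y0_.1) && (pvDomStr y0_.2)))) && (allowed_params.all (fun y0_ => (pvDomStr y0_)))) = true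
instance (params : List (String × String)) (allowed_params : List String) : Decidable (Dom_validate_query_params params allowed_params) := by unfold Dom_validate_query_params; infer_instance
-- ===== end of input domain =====

-- B sanitizes all of params in one pass, then selects along the de-duplicated whitelist,
-- instead of A's single whitelist loop that tests/looks up/sanitizes/inserts per key (objective: idiomatic).


-- ===== PORT A =====
-- sanitize_string: under the type convention the value is always a str (never None),
-- so the `value is None` and `not isinstance(value, str)` branches of the Python are unreachable.
def sanitize_string (value : String) (max_length : Int) : String :=
  let v := PySem.Str.strip (PySem.Str.replace value (String.ofList ['\x00']) "")
  if PySem.Str.len v > max_length then PySem.Str.slice v none (some max_length) else v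

-- `if key in params: value = params[key]` is ported as one match on the dict lookup
-- (the subscript is guarded by the membership test, so `none` is exactly the `else` of the guard).
def validate_query_params (params : List (String × String)) (allowed_params : List String) : List (String × String) :=
  (allowed_params.foldl
    (fun validated key =>
      match (PySem.Dict.mk params).get? key with
      | some value => validated.insert key (sanitize_string value 500)
      | none => validated)
    PySem.Dict.empty).items

-- ===== PORT B =====
def validate_query_params_alt (params : List (String × String)) (allowed_params : List String) : List (String × String) :=
  let sanitized : PySem.Dict String String :=
    params.foldl (fun d p => d.insert p.1 (sanitize_string p.2 500)) PySem.Dict.empty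
  ((PySem.List.dedup allowed_params).foldl
    (fun out k =>
      match sanitized.get? k with
      | some w => out.insert k w
      | none => out)
    PySem.Dict.empty).items

-- ===== PRECONDITION & SPEC =====
-- Pre_ excludes association lists with duplicate keys in params: a Python dict cannot contain
-- duplicate keys, so such lists represent no actual input of A (the two list encodings would
-- disagree on which value of a duplicated key survives).
def Pre_validate_query_params (params : List (String × String)) (allowed_params : List String) : Prop :=
  (params.map Prod.fst).Nodup
instance (params : List (String × String)) (allowed_params : List String) : Decidable (Pre_validate_query_params params allowed_params) := by unfold Pre_validate_query_params; infer_instance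
def pvWitness_validate_query_params : (List (String × String)) × List String :=
  ([("a", " x "), ("b", "y")], ["b", "c", "b"])

def Spec_validate_query_params (params : List (String × String)) (allowed_params : List String) (out : List (String × String)) : Prop := out = validate_query_params_alt params allowed_params
instance (params : List (String × String)) (allowed_params : List String) (out : List (String × String)) : Decidable (Spec_validate_query_params params allowed_params out) := by unfold Spec_validate_query_params; infer_instance

-- ===== CLAIM (what is proved, stated in full; the proofs are below) =====
def Claim_equal_validate_query_params : Prop := ∀ (params : List (String × String)) (allowed_params : List String), Dom_validate_query_params params allowed_params → Pre_validate_query_params params allowed_params → Spec_validate_query_params params allowed_params (validate_query_params params allowed_params)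

-- ===== LEMMAS AND PROOFS =====

-- the sanitized value the dict holds at key k (none = key absent), common to both ports
def pvG (params : List (String × String)) (k : String) : Option String :=
  ((PySem.Dict.mk params).get? k).map (fun v => sanitize_string v 500)

-- the shared step function both loops reduce to
def pvF (params : List (String × String)) (acc : PySem.Dict String String) (k : String) : PySem.Dict String String :=
  match pvG params k with
  | some w => acc.insert k w
  | none => acc

-- the dict both loops build, as a function of the ordered key list processed so far
def pvBuild (params : List (String × String)) (ks : List String) : PySem.Dict String String :=
  ⟨ks.filterMap (fun k => (pvG params k).map (fun w => (k, w)))⟩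

theorem pv_mem_build {params : List (String × String)} {ks : List String} {k w} :
    (k, w) ∈ (pvBuild params ks).items → k ∈ ks ∧ pvG params k = some w := by
  intro h
  simp only [pvBuild, List.mem_filterMap] at h
  obtain ⟨a, ha, hfa⟩ := h
  cases hg : pvG params a <;> simp [hg] at hfa
  obtain ⟨rfl, rfl⟩ := hfa
  exact ⟨ha, hg⟩

theorem pv_contains_build_false {params : List (String × String)} {ks : List String} {k}
    (hk : k ∉ ks) : (pvBuild params ks).contains k = false := by
  cases hc : (pvBuild params ks).contains k
  · rfl
  · exfalso
    rw [PySem.Dict.contains_iff_mem_keys] at hc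
    simp only [PySem.Dict.keys, List.mem_map] at hc
    obtain ⟨⟨k', w⟩, hmem, h1⟩ := hc
    cases h1
    exact hk (pv_mem_build hmem).1

theorem pv_build_insert_mem {params : List (String × String)} {ks : List String} {k w}
    (hk : k ∈ ks) (hg : pvG params k = some w) :
    (pvBuild params ks).insert k w = pvBuild params ks := by
  have hc : (pvBuild params ks).contains k = true := by
    rw [PySem.Dict.contains_iff_mem_keys]
    simp only [PySem.Dict.keys, List.mem_map]
    refine ⟨(k, w), ?_, rfl⟩
    simp only [pvBuild, List.mem_filterMap]
    exact ⟨k, hk, by simp [hg]⟩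
  rw [PySem.Dict.insert, hc]
  simp only [if_true]
  apply PySem.Dict.ext
  simp only []
  have : ∀ p ∈ (pvBuild params ks).items,
      (if p.1 == k then (k, w) else p) = p := by
    intro ⟨k', w'⟩ hmem
    by_cases he : k' = k
    · subst he
      obtain ⟨_, hg'⟩ := pv_mem_build hmem
      rw [hg] at hg'
      cases hg'
      simp
    · simp [he]
  calc (pvBuild params ks).items.map (fun p => if p.1 == k then (k, w) else p)
      = (pvBuild params ks).items.map id := List.map_congr_left (by simpa using this)
    _ = (pvBuild params ks).items := List.map_id _

theorem pv_build_insert_new {params : List (String × String)} {ks : List String} {k w}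
    (hk : k ∉ ks) (hg : pvG params k = some w) :
    (pvBuild params ks).insert k w = pvBuild params (ks ++ [k]) := by
  rw [PySem.Dict.insert, pv_contains_build_false hk]
  simp only [Bool.false_eq_true, if_false]
  show PySem.Dict.mk _ = _
  unfold pvBuild
  rw [List.filterMap_append]
  simp [hg]

theorem pv_build_append_none {params : List (String × String)} {ks : List String} {k}
    (hg : pvG params k = none) : pvBuild params (ks ++ [k]) = pvBuild params ks := by
  unfold pvBuild
  rw [List.filterMap_append]
  simp [hg]

-- the central loop invariant: folding pvF over l extends the built dict along the
-- first occurrences of the keys of l (PySem.Set.update = seen-set dedup continuation)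
theorem pv_fold_build (params : List (String × String)) :
    ∀ (l ks : List String), ks.Nodup →
      l.foldl (pvF params) (pvBuild params ks) = pvBuild params (PySem.Set.update ks l) := by
  intro l
  induction l with
  | nil => intro ks _; rfl
  | cons k t ih =>
    intro ks hnd
    have hupd : PySem.Set.update ks (k :: t) = PySem.Set.update (PySem.Set.add ks k) t := rfl
    rw [List.foldl_cons, hupd]
    by_cases hmem : k ∈ ks
    · have hadd : PySem.Set.add ks k = ks := by
        simp [PySem.Set.add, PySem.Set.contains, hmem]
      have hstep : pvF params (pvBuild params ks) k = pvBuild params ks := by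
        unfold pvF
        cases hg : pvG params k with
        | none => rfl
        | some w => exact pv_build_insert_mem hmem hg
      rw [hstep, hadd, ih ks hnd]
    · have hadd : PySem.Set.add ks k = ks ++ [k] := by
        simp [PySem.Set.add, PySem.Set.contains, hmem]
      have hnd' : (ks ++ [k]).Nodup :=
        List.Nodup.append hnd (List.nodup_singleton k) (by simpa using hmem)
      have hstep : pvF params (pvBuild params ks) k = pvBuild params (ks ++ [k]) := by
        unfold pvF
        cases hg : pvG params k with
        | none => simpa [hg] using (pv_build_append_none (ks := ks) hg).symm
        | some w => exact pv_build_insert_new hmem hg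
      rw [hstep, hadd, ih (ks ++ [k]) hnd']
  
-- A's loop step is pvF
theorem pv_stepA_eq (params : List (String × String)) :
    (fun (validated : PySem.Dict String String) key =>
      match (PySem.Dict.mk params).get? key with
      | some value => validated.insert key (sanitize_string value 500)
      | none => validated) = pvF params := by
  funext acc k
  unfold pvF pvG
  cases h : (PySem.Dict.mk params).get? k <;> simp [h]

-- B's pre-sanitized dict answers lookups exactly like pvG, given nodup params keys
theorem pv_sanitized_get? (params : List (String × String)) (hnd : (params.map Prod.fst).Nodup) (k : String) :
    (params.foldl (fun d p => d.insert p.1 (sanitize_string p.2 500)) PySem.Dict.empty).get? k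
      = pvG params k := by
  have main : ∀ (ps : List (String × String)) (d : PySem.Dict String String),
      (ps.map Prod.fst).Nodup →
      (ps.foldl (fun d p => d.insert p.1 (sanitize_string p.2 500)) d).get? k
        = match ps.find? (fun p => p.1 == k) with
          | some p => some (sanitize_string p.2 500)
          | none => d.get? k := by
    intro ps
    induction ps with
    | nil => intro d _; rfl
    | cons a t iht =>
      intro d hnd'
      rw [List.map_cons, List.nodup_cons] at hnd'
      rw [List.foldl_cons, iht _ hnd'.2]
      by_cases he : a.1 = k
      · have hfind : t.find? (fun p => p.1 == k) = none := by
          rw [List.find?_eq_none]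
          intro p hp hbeq
          exact hnd'.1 (by
            have : p.1 = a.1 := by subst he; exact (by simpa using hbeq)
            rw [← this]; exact List.mem_map_of_mem hp)
        rw [hfind]
        simp only [List.find?_cons, he]
        simp [PySem.Dict.get?_insert_self]
      · simp only [List.find?_cons]
        rw [show ((a.1 == k) = false) by simp [he]]
        cases hf : t.find? (fun p => p.1 == k) with
        | some p => simp
        | none =>
          exact PySem.Dict.get?_insert_of_ne _ _ (fun h => he h.symm)
  rw [main params _ hnd]
  unfold pvG
  rw [show (PySem.Dict.mk params).get? k
      = (params.find? (fun p => p.1 == k)).map (fun x => x.2) from rfl]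
  cases hf : params.find? (fun p => p.1 == k) <;> simp

-- Set.update from the empty seen set of a nodup list is the list itself
theorem pv_update_nil_of_nodup : ∀ (l : List String), l.Nodup → PySem.Set.update [] l = l := by
  intro l hl
  have gen : ∀ (t s : List String), s.Nodup → t.Nodup → (∀ x ∈ t, x ∉ s) →
      PySem.Set.update s t = s ++ t := by
    intro t
    induction t with
    | nil => intro s _ _ _; simp [PySem.Set.update]
    | cons a t iht =>
      intro s hs ht hdisj
      rw [List.nodup_cons] at ht
      have hadd : PySem.Set.add s a = s ++ [a] := by
        simp [PySem.Set.add, PySem.Set.contains, hdisj a (by simp)]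
      have : PySem.Set.update s (a :: t) = PySem.Set.update (s ++ [a]) t := by
        simp [PySem.Set.update, hadd]
      rw [this, iht (s ++ [a])
        (List.Nodup.append hs (List.nodup_singleton a) (by simpa using hdisj a (by simp))) ht.2
        (by intro x hx; simp; exact ⟨fun hxs => hdisj x (by simp [hx]) hxs, fun he => ht.1 (he ▸ hx)⟩)]
      simp
  simpa using gen l [] List.nodup_nil hl (by simp)

-- ===== VERDICT (by name: the statement is the Claim_ definition above) =====
theorem validate_query_params_spec : Claim_equal_validate_query_params := by
  intro params allowed_params _ hpre
  unfold Spec_validate_query_params validate_query_params validate_query_params_alt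
  have hstepB : (fun (out : PySem.Dict String String) k =>
      match (params.foldl (fun d p => d.insert p.1 (sanitize_string p.2 500)) PySem.Dict.empty).get? k with
      | some w => out.insert k w
      | none => out) = pvF params := by
    funext acc k
    rw [pv_sanitized_get? params hpre k]
    rfl
  rw [pv_stepA_eq params]
  simp only [hstepB]
  have hempty : (PySem.Dict.empty : PySem.Dict String String) = pvBuild params [] := rfl
  rw [hempty, pv_fold_build params allowed_params [] List.nodup_nil,
      pv_fold_build params (PySem.List.dedup allowed_params) [] List.nodup_nil]
  rw [pv_update_nil_of_nodup (PySem.List.dedup allowed_params) (PySem.List.nodup_dedup allowed_params)]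
  rw [show PySem.Set.update ([] : List String) allowed_params = PySem.List.dedup allowed_params by
    rw [PySem.List.dedup_eq_ofList]; rfl]
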